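-- pv_equiv track=rewrite | github.com/me-ahnafnasim/python_problems | cursorAI/exam_problem/type3/del_nodes.py | dllb
-- ===== SOURCE A (Python) =====
-- def dllb(listx, low, high):
--     dll = listx
--     current = dll['head']['next']
--
--     while current != 'tail':
--         value = int(current)
--         if value < low or value > high:
--             # Remove current node
--             prev_node = dll[current]['prev']
--             next_node = dll[current]['next']
--             dll[prev_node]['next'] = next_node
--             dll[next_node]['prev'] = prev_node
--             del dll[current]
--             current = next_node
--         else:
--             current = dll[current]['next']
--
--     return dll
-- ===== SOURCE B (Python) =====
-- def dllb(listx, low, high):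
--     # Separate the phases instead of unlinking while traversing: walk the chain once
--     # to collect the node order; if nothing is out of range there is nothing to do;
--     # otherwise delete the out-of-range keys and rewrite the prev/next links along
--     # the surviving chain.  Mutates listx in place, like A.
--     order = []
--     cur = listx['head']['next']
--     while cur != 'tail':
--         order.append(cur)
--         cur = listx[cur]['next']
--     removed = [k for k in order if not (low <= int(k) <= high)]
--     if not removed:
--         return listx
--     for k in removed:
--         del listx[k]
--     surv = [k for k in order if low <= int(k) <= high]
--     chain = ['head'] + surv + ['tail']
--     for p, n in zip(chain, chain[1:]):
--         listx[p]['next'] = n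
--         listx[n]['prev'] = p
--     return listx
-- ===== Notes on version B (the rewrite author's own statement) =====
-- stated objective: alternative
-- what changed: A unlinks out-of-range nodes one at a time while traversing, patching neighbour pointers at each removal; B separates the phases: one walk collecting the node order, deletion of every out-of-range key, then one pass rewriting all prev/next links along the surviving chain.
import Mathlib
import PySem

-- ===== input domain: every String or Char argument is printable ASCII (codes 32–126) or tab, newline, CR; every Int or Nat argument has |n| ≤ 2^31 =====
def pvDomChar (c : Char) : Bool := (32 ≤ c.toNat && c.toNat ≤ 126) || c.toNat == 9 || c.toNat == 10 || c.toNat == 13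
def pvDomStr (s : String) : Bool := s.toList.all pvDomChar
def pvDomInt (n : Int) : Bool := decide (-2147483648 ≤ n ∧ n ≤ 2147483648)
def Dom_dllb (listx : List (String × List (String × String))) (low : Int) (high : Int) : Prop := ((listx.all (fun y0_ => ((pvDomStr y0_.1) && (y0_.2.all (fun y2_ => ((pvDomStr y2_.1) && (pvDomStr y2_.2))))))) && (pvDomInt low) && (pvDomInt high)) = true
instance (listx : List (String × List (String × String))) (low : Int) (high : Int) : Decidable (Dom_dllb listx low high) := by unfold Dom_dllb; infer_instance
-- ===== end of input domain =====

-- B removes the nodes in separate phases (walk, delete, relink) instead of A's in-place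
-- unlinking during the traversal (objective: alternative).  Both mutate listx in Python;
-- the equivalence proved here is about the return value.

-- ===== PORT A =====
-- Hand-rolled Python-dict primitives on association lists: first-match lookup (a missing
-- key is a KeyError in Python, modelled by the default and reachable only outside Pre_),
-- in-place overwrite-or-append assignment, first-match deletion.  Exact for the unique-key
-- dicts Pre_ admits.
def pvGetD {α : Type} (l : List (String × α)) (k : String) (dflt : α) : α :=
  match l with
  | [] => dflt
  | (k', v) :: rest => if k' = k then v else pvGetD rest k dflt

def pvSet {α : Type} (l : List (String × α)) (k : String) (v : α) : List (String × α) :=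
  match l with
  | [] => [(k, v)]
  | (k', v') :: rest => if k' = k then (k', v) :: rest else (k', v') :: pvSet rest k v

def pvDel {α : Type} (l : List (String × α)) (k : String) : List (String × α) :=
  match l with
  | [] => []
  | (k', v') :: rest => if k' = k then rest else (k', v') :: pvDel rest k

-- dll[k][f]  and  dll[k][f] = v
def pvField (dll : List (String × List (String × String))) (k f : String) : String :=
  pvGetD (pvGetD dll k []) f ""
def pvSetField (dll : List (String × List (String × String))) (k f v : String) :
    List (String × List (String × String)) :=
  pvSet dll k (pvSet (pvGetD dll k []) f v)

-- the while loop; fuel = number of dict entries suffices (each step passes or removes one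
-- node and the visited nodes are distinct under Pre_); fuel exhaustion and an unparsable key
-- (a ValueError in Python) return the current dict, both unreachable under Pre_
def dllbLoop (low high : Int) : Nat → List (String × List (String × String)) → String →
    List (String × List (String × String))
  | 0, dll, _ => dll
  | Nat.succ fuel, dll, current =>
    if current = "tail" then dll
    else
      match PySem.Int.ofStr? current with
      | none => dll
      | some value =>
        if value < low ∨ value > high then
          let prevNode := pvField dll current "prev"
          let nextNode := pvField dll current "next"
          let dll1 := pvSetField dll prevNode "next" nextNode
          let dll2 := pvSetField dll1 nextNode "prev" prevNode
          let dll3 := pvDel dll2 current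
          dllbLoop low high fuel dll3 nextNode
        else dllbLoop low high fuel dll (pvField dll current "next")

def dllb (listx : List (String × List (String × String))) (low : Int) (high : Int) :
    List (String × List (String × String)) :=
  dllbLoop low high listx.length listx (pvField listx "head" "next")

-- ===== PORT B =====
-- low <= int(k) <= high (an unparsable key is a ValueError in Python, only outside Pre_)
def pvKeep (low high : Int) (k : String) : Bool :=
  match PySem.Int.ofStr? k with
  | some v => decide (low ≤ v) && decide (v ≤ high)
  | none => false

-- Source B's first while loop: collect the chain keys by following 'next' until 'tail'
-- (fuel = number of dict entries, enough under Pre_ where the visited keys are distinct)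
def pvWalk (d : List (String × List (String × String))) : Nat → String → List String
  | 0, _ => []
  | Nat.succ fuel, cur =>
    if cur = "tail" then [] else cur :: pvWalk d fuel (pvField d cur "next")

-- Source B's final loop: for p, n in zip(chain, chain[1:]): d[p]['next'] = n; d[n]['prev'] = p
def relinkPairs : List (String × List (String × String)) → List String →
    List (String × List (String × String))
  | d, p :: n :: rest => relinkPairs (pvSetField (pvSetField d p "next" n) n "prev" p) (n :: rest)
  | d, _ => d

def dllb_alt (listx : List (String × List (String × String))) (low : Int) (high : Int) :
    List (String × List (String × String)) :=
  let order := pvWalk listx listx.length (pvField listx "head" "next")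
  let removed := order.filter (fun k => !(pvKeep low high k))
  if removed.isEmpty then listx
  else
    let surv := order.filter (pvKeep low high)
    let d1 := removed.foldl (fun d k => pvDel d k) listx
    relinkPairs d1 ("head" :: (surv ++ ["tail"]))

-- ===== PRECONDITION & SPEC =====
-- first-match lookup returning an Option (used by Pre_ and the proofs)
def lookA {α : Type} : List (String × α) → String → Option α
  | [], _ => none
  | (k', v) :: rest, k => if k' = k then some v else lookA rest k

-- Pre_: the dict is a well-formed doubly-linked list — following 'next' from 'head' reaches
-- 'tail' without revisiting a key, every visited key parses as an int and its 'prev' points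
-- back to its predecessor, 'tail''s 'prev' points to the last node — and the outer keys are
-- distinct.  (Reachability is inherently recursive, so it is checked by a bounded walk; the
-- walk does not depend on low/high and runs neither implementation.)  Pre_ excludes some
-- inputs on which A still returns: malformed dicts (a stray unparsable entry, a stale 'prev'
-- on a node that stays in range, a missing 'tail' entry) whose broken parts A happens never
-- to visit; A's value there is an artefact of the representation, and B raises or repairs
-- the stale pointer instead.
def preWalk (d : List (String × List (String × String))) :
    List String → Nat → String → String → Bool
  | _, 0, _, _ => false
  | vis, Nat.succ fuel, prevK, cur =>
    if cur = "tail" then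
      match lookA d "tail" with
      | some t => lookA t "prev" == some prevK
      | none => false
    else
      !(vis.contains cur) &&
      (match lookA d cur with
       | some v =>
         (PySem.Int.ofStr? cur).isSome &&
         (lookA v "prev" == some prevK) &&
         (match lookA v "next" with
          | some nxt => preWalk d (cur :: vis) fuel cur nxt
          | none => false)
       | none => false)

-- the weaker walk for the no-removal case: following 'next' from 'head' reaches 'tail' and
-- every visited key parses to an int inside [low, high] (then neither program deletes or
-- rewrites anything, so no back-pointer consistency is needed)
def preWalkLite (low high : Int) (d : List (String × List (String × String))) :
    Nat → String → Bool
  | 0, _ => false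
  | Nat.succ fuel, cur =>
    if cur = "tail" then true
    else
      match lookA d cur with
      | some v =>
        pvKeep low high cur &&
        (match lookA v "next" with
         | some nxt => preWalkLite low high d fuel nxt
         | none => false)
      | none => false

def Pre_dllb (listx : List (String × List (String × String))) (low : Int) (high : Int) : Prop :=
  (match lookA listx "head" with
   | some h =>
     match lookA h "next" with
     | some n0 =>
       preWalk listx ["head"] listx.length "head" n0 ||
         preWalkLite low high listx listx.length n0
     | none => false
   | none => false) = true ∧ (listx.map Prod.fst).Nodup

instance (listx : List (String × List (String × String))) (low : Int) (high : Int) :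
    Decidable (Pre_dllb listx low high) := by unfold Pre_dllb; infer_instance

def pvWitness_dllb : (List (String × List (String × String))) × Int × Int :=
  ([("head", [("next", "1")]),
    ("1", [("prev", "head"), ("next", "2")]),
    ("2", [("prev", "1"), ("next", "tail")]),
    ("tail", [("prev", "2")])], 1, 1)

def Spec_dllb (listx : List (String × List (String × String))) (low : Int) (high : Int)
    (out : List (String × List (String × String))) : Prop := out = dllb_alt listx low high

instance (listx : List (String × List (String × String))) (low : Int) (high : Int)
    (out : List (String × List (String × String))) : Decidable (Spec_dllb listx low high out) := by
  unfold Spec_dllb; infer_instance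

-- ===== CLAIM (what is proved, stated in full; the proofs are below) =====
def Claim_equal_dllb : Prop := ∀ (listx : List (String × List (String × String))) (low : Int) (high : Int), Dom_dllb listx low high → Pre_dllb listx low high → Spec_dllb listx low high (dllb listx low high)

-- ===== LEMMAS AND PROOFS =====

-- ---- association-list operation lemmas ----
theorem pvGetD_eq_lookA {α : Type} (l : List (String × α)) (k : String) (d : α) (v : α)
    (h : lookA l k = some v) : pvGetD l k d = v := by
  induction l with
  | nil => simp [lookA] at h
  | cons e rest ih =>
    obtain ⟨k', w⟩ := e
    by_cases hk : k' = k
    · simp [lookA, hk] at h; simp [pvGetD, hk, h]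
    · simp [lookA, hk] at h; simp [pvGetD, hk, ih h]

theorem lookA_pvSet_self {α : Type} (l : List (String × α)) (k : String) (v : α) :
    lookA (pvSet l k v) k = some v := by
  induction l with
  | nil => simp [pvSet, lookA]
  | cons e rest ih =>
    obtain ⟨k', w⟩ := e
    by_cases hk : k' = k
    · simp [pvSet, hk, lookA]
    · simp [pvSet, hk, lookA, ih]

theorem lookA_pvSet_ne {α : Type} (l : List (String × α)) (k x : String) (v : α)
    (h : x ≠ k) : lookA (pvSet l k v) x = lookA l x := by
  induction l with
  | nil => simp [pvSet, lookA, Ne.symm h]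
  | cons e rest ih =>
    obtain ⟨k', w⟩ := e
    by_cases hk : k' = k
    · simp [pvSet, hk, lookA, Ne.symm h]
    · simp [pvSet, hk, lookA, ih]

theorem lookA_pvDel_ne {α : Type} (l : List (String × α)) (k x : String)
    (h : x ≠ k) : lookA (pvDel l k) x = lookA l x := by
  induction l with
  | nil => simp [pvDel]
  | cons e rest ih =>
    obtain ⟨k', w⟩ := e
    by_cases hk : k' = k
    · subst hk; simp [pvDel, lookA, Ne.symm h]
    · simp [pvDel, hk, lookA, ih]

theorem pvSet_lookA_id {α : Type} (l : List (String × α)) (k : String) (v : α)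
    (h : lookA l k = some v) : pvSet l k v = l := by
  induction l with
  | nil => simp [lookA] at h
  | cons e rest ih =>
    obtain ⟨k', w⟩ := e
    by_cases hk : k' = k
    · simp [lookA, hk] at h; simp [pvSet, hk, h]
    · simp [lookA, hk] at h; simp [pvSet, hk, ih h]

theorem pvSet_pvSet_self {α : Type} (l : List (String × α)) (k : String) (a b : α) :
    pvSet (pvSet l k a) k b = pvSet l k b := by
  induction l with
  | nil => simp [pvSet]
  | cons e rest ih =>
    obtain ⟨k', w⟩ := e
    by_cases hk : k' = k
    · simp [pvSet, hk]
    · simp [pvSet, hk, ih]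

theorem pvGetD_pvSet_self {α : Type} (l : List (String × α)) (k : String) (a : α) (d : α) :
    pvGetD (pvSet l k a) k d = a := by
  induction l with
  | nil => simp [pvSet, pvGetD]
  | cons e rest ih =>
    obtain ⟨k', w⟩ := e
    by_cases hk : k' = k
    · simp [pvSet, hk, pvGetD]
    · simp [pvSet, hk, pvGetD, ih]

theorem pvGetD_pvSet_ne {α : Type} (l : List (String × α)) (k x : String) (a : α) (d : α)
    (h : x ≠ k) : pvGetD (pvSet l k a) x d = pvGetD l x d := by
  induction l with
  | nil => simp [pvSet, pvGetD, Ne.symm h]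
  | cons e rest ih =>
    obtain ⟨k', w⟩ := e
    by_cases hk : k' = k
    · simp [pvSet, hk, pvGetD, Ne.symm h]
    · simp [pvSet, hk, pvGetD, ih]

theorem pvGetD_pvDel_ne {α : Type} (l : List (String × α)) (k x : String) (d : α)
    (h : x ≠ k) : pvGetD (pvDel l k) x d = pvGetD l x d := by
  induction l with
  | nil => simp [pvDel]
  | cons e rest ih =>
    obtain ⟨k', w⟩ := e
    by_cases hk : k' = k
    · subst hk; simp [pvDel, pvGetD, Ne.symm h]
    · simp [pvDel, hk, pvGetD, ih]

theorem pvSet_comm {α : Type} (l : List (String × α)) (k1 k2 : String) (v1 v2 : α)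
    (hne : k1 ≠ k2) (h1 : (lookA l k1).isSome) :
    pvSet (pvSet l k1 v1) k2 v2 = pvSet (pvSet l k2 v2) k1 v1 := by
  induction l with
  | nil => simp [lookA] at h1
  | cons e rest ih =>
    obtain ⟨k', w⟩ := e
    by_cases ha : k' = k1
    · subst ha; simp [pvSet, hne, Ne.symm hne]
    · by_cases hb : k' = k2
      · subst hb; simp [pvSet, ha, Ne.symm hne]
      · simp only [lookA, if_neg ha] at h1
        simp [pvSet, ha, hb, ih h1]

theorem pvDel_pvSet_ne {α : Type} (l : List (String × α)) (k x : String) (v : α)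
    (h : k ≠ x) : pvDel (pvSet l x v) k = pvSet (pvDel l k) x v := by
  induction l with
  | nil => simp [pvSet, pvDel, Ne.symm h]
  | cons e rest ih =>
    obtain ⟨k', w⟩ := e
    by_cases ha : k' = x
    · subst ha; simp [pvSet, pvDel, Ne.symm h]
    · by_cases hb : k' = k
      · subst hb; simp [pvSet, pvDel, ha]
      · simp [pvSet, pvDel, ha, hb, ih]

theorem pvDel_pvSet_self {α : Type} (l : List (String × α)) (k : String) (v : α) :
    pvDel (pvSet l k v) k = pvDel l k := by
  induction l with
  | nil => simp [pvSet, pvDel]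
  | cons e rest ih =>
    obtain ⟨k', w⟩ := e
    by_cases hk : k' = k
    · simp [pvSet, pvDel, hk]
    · simp [pvSet, pvDel, hk, ih]

-- ---- field-level lemmas ----
theorem pvSetField_absorb (d : List (String × List (String × String))) (k f : String)
    (v w : String) : pvSetField (pvSetField d k f v) k f w = pvSetField d k f w := by
  unfold pvSetField
  rw [pvGetD_pvSet_self, pvSet_pvSet_self, pvSet_pvSet_self]

theorem lookA_pvSetField_ne (d : List (String × List (String × String))) (k f v : String)
    (x : String) (h : x ≠ k) : lookA (pvSetField d k f v) x = lookA d x := by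
  unfold pvSetField; exact lookA_pvSet_ne _ _ _ _ h

theorem lookA_pvSetField_self (d : List (String × List (String × String))) (k f v : String) :
    lookA (pvSetField d k f v) k = some (pvSet (pvGetD d k []) f v) := by
  unfold pvSetField; exact lookA_pvSet_self _ _ _

theorem pvSetField_comm (d : List (String × List (String × String))) (k1 f1 v1 k2 f2 v2 : String)
    (hne : k1 ≠ k2) (h1 : (lookA d k1).isSome) :
    pvSetField (pvSetField d k1 f1 v1) k2 f2 v2 = pvSetField (pvSetField d k2 f2 v2) k1 f1 v1 := by
  unfold pvSetField
  rw [pvGetD_pvSet_ne _ _ _ _ _ (Ne.symm hne), pvGetD_pvSet_ne _ _ _ _ _ hne]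
  exact pvSet_comm _ _ _ _ _ hne h1

theorem pvSetField_id (d : List (String × List (String × String))) (k f v : String)
    (w : List (String × String)) (h1 : lookA d k = some w) (h2 : lookA w f = some v) :
    pvSetField d k f v = d := by
  unfold pvSetField
  rw [pvGetD_eq_lookA _ _ _ _ h1, pvSet_lookA_id _ _ _ h2, pvSet_lookA_id _ _ _ h1]

theorem pvDel_pvSetField_ne (d : List (String × List (String × String))) (k x f v : String)
    (h : k ≠ x) : pvDel (pvSetField d x f v) k = pvSetField (pvDel d k) x f v := by
  unfold pvSetField
  rw [pvGetD_pvDel_ne _ _ _ _ (Ne.symm h)]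
  exact pvDel_pvSet_ne _ _ _ _ h

theorem pvDel_pvSetField_self (d : List (String × List (String × String))) (k f v : String) :
    pvDel (pvSetField d k f v) k = pvDel d k := pvDel_pvSet_self _ _ _

-- ---- deletion-fold lemmas ----
theorem lookA_delAll (rem : List String) (d : List (String × List (String × String)))
    (x : String) (h : x ∉ rem) :
    lookA (rem.foldl (fun d k => pvDel d k) d) x = lookA d x := by
  induction rem generalizing d with
  | nil => rfl
  | cons r rem ih =>
    simp only [List.mem_cons, not_or] at h
    simp only [List.foldl_cons]
    rw [ih _ h.2, lookA_pvDel_ne _ _ _ h.1]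

theorem delAll_pvSetField_not_mem (rem : List String) (d : List (String × List (String × String)))
    (x f v : String) (h : x ∉ rem) :
    rem.foldl (fun d k => pvDel d k) (pvSetField d x f v) =
      pvSetField (rem.foldl (fun d k => pvDel d k) d) x f v := by
  induction rem generalizing d with
  | nil => rfl
  | cons r rem ih =>
    simp only [List.mem_cons, not_or] at h
    simp only [List.foldl_cons]
    rw [pvDel_pvSetField_ne _ _ _ _ _ (Ne.symm h.1), ih _ h.2]

theorem delAll_pvSetField_mem (rem : List String) (d : List (String × List (String × String)))
    (x f v : String) (h : x ∈ rem) :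
    rem.foldl (fun d k => pvDel d k) (pvSetField d x f v) =
      rem.foldl (fun d k => pvDel d k) d := by
  induction rem generalizing d with
  | nil => simp at h
  | cons r rem ih =>
    simp only [List.foldl_cons]
    by_cases hr : x = r
    · subst hr; rw [pvDel_pvSetField_self]
    · rcases List.mem_cons.mp h with h' | h'
      · exact absurd h' hr
      · rw [pvDel_pvSetField_ne _ _ _ _ _ (Ne.symm hr), ih _ h']

-- ---- relink lemmas ----
theorem relink_absorb_next (d : List (String × List (String × String))) (p n x : String)
    (c : List String) :
    relinkPairs (pvSetField d p "next" x) (p :: n :: c) = relinkPairs d (p :: n :: c) := by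
  simp only [relinkPairs]
  rw [pvSetField_absorb]

theorem relink_absorb_prev (d : List (String × List (String × String))) (p q x : String)
    (c : List String) (hqp : q ≠ p) (hq : (lookA d q).isSome) :
    relinkPairs (pvSetField d q "prev" x) (p :: q :: c) = relinkPairs d (p :: q :: c) := by
  simp only [relinkPairs]
  rw [pvSetField_comm d q "prev" x p "next" q hqp hq, pvSetField_absorb]

-- ---- the walk invariant ----
def WInv (d : List (String × List (String × String))) : String → List String → Prop
  | p, [] => ∃ t, lookA d "tail" = some t ∧ lookA t "prev" = some p
  | p, k :: ks =>
      (∃ v, lookA d k = some v ∧ lookA v "prev" = some p ∧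
        lookA v "next" = some (ks.headD "tail")) ∧
      (PySem.Int.ofStr? k).isSome ∧ WInv d k ks

theorem WInv_ext (rest : List String) (p : String)
    (d1 d2 : List (String × List (String × String)))
    (h : ∀ x, x ∈ rest ∨ x = "tail" → lookA d1 x = lookA d2 x) :
    WInv d2 p rest → WInv d1 p rest := by
  induction rest generalizing p with
  | nil => intro hw; obtain ⟨t, h1, h2⟩ := hw; exact ⟨t, by rw [h _ (Or.inr rfl)]; exact h1, h2⟩
  | cons k ks ih =>
    intro hw
    obtain ⟨⟨v, h1, h2, h3⟩, hp, hrec⟩ := hw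
    refine ⟨⟨v, ?_, h2, h3⟩, hp, ?_⟩
    · rw [h _ (Or.inl (List.mem_cons_self))]; exact h1
    · exact ih k (fun x hx => h x (by rcases hx with hx | hx; exact Or.inl (List.mem_cons_of_mem _ hx); exact Or.inr hx)) hrec

-- ===== the main lemma: A's loop equals B's delete-then-relink pipeline =====
theorem dllbLoop_pipeline (low high : Int) :
    ∀ (rest : List String) (fuel : Nat) (d : List (String × List (String × String)))
      (prevK : String),
      rest.length < fuel →
      (∃ w, lookA d prevK = some w ∧ lookA w "next" = some (rest.headD "tail")) →
      WInv d prevK rest →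
      rest.Nodup → "tail" ∉ rest → prevK ∉ rest → prevK ≠ "tail" →
      dllbLoop low high fuel d (rest.headD "tail") =
        relinkPairs
          ((rest.filter (fun k => !(pvKeep low high k))).foldl (fun d k => pvDel d k) d)
          (prevK :: (rest.filter (pvKeep low high) ++ ["tail"])) := by
  intro rest
  induction rest with
  | nil =>
    intro fuel d prevK hfuel hN hW hnd htl hpv hpt
    cases fuel with
    | zero => omega
    | succ f =>
      obtain ⟨w, hw, hwn⟩ := hN
      obtain ⟨t, ht, htp⟩ := hW
      simp only [List.headD_nil, List.filter_nil, List.foldl_nil, List.nil_append]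
      rw [show dllbLoop low high (f + 1) d "tail" = d from by simp [dllbLoop]]
      simp only [relinkPairs]
      rw [pvSetField_id d prevK "next" "tail" w hw (by simpa using hwn),
          pvSetField_id d "tail" "prev" prevK t ht htp]
  | cons k ks ih =>
    intro fuel d prevK hfuel hN hW hnd htl hpv hpt
    obtain ⟨hWk, hpar, hWrec⟩ := hW
    obtain ⟨v, hvk, hvprev, hvnext⟩ := hWk
    obtain ⟨w, hw, hwn⟩ := hN
    obtain ⟨val, hval⟩ := Option.isSome_iff_exists.mp hpar
    have hktail : k ≠ "tail" := fun h => htl (h ▸ List.mem_cons_self)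
    have hkprev : k ≠ prevK := fun h => hpv (h ▸ List.mem_cons_self)
    have hndk : k ∉ ks := (List.nodup_cons.mp hnd).1
    have hnd' : ks.Nodup := (List.nodup_cons.mp hnd).2
    have htl' : "tail" ∉ ks := fun h => htl (List.mem_cons_of_mem _ h)
    have hpv' : prevK ∉ ks := fun h => hpv (List.mem_cons_of_mem _ h)
    have hremsub : ∀ x, x ∈ ks.filter (fun k => !(pvKeep low high k)) → x ∈ ks :=
      fun x hx => (List.mem_filter.mp hx).1
    have hkrem : k ∉ ks.filter (fun k => !(pvKeep low high k)) :=
      fun hx => hndk (hremsub _ hx)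
    have hprem : prevK ∉ ks.filter (fun k => !(pvKeep low high k)) :=
      fun hx => hpv' (hremsub _ hx)
    cases fuel with
    | zero => simp at hfuel
    | succ f =>
      have hfld1 : pvField d k "prev" = prevK := by
        unfold pvField
        rw [pvGetD_eq_lookA _ _ _ _ hvk, pvGetD_eq_lookA _ _ _ _ hvprev]
      have hfld2 : pvField d k "next" = ks.headD "tail" := by
        unfold pvField
        rw [pvGetD_eq_lookA _ _ _ _ hvk, pvGetD_eq_lookA _ _ _ _ hvnext]
      simp only [List.headD_cons]
      by_cases hkeep : val < low ∨ val > high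
      · -- ---- removal branch ----
        have hkf : pvKeep low high k = false := by
          simp only [pvKeep, hval]
          simp only [Bool.and_eq_false_iff, decide_eq_false_iff_not]
          omega
        have hnxt_ne_k : ks.headD "tail" ≠ k := by
          cases ks with
          | nil => exact Ne.symm hktail
          | cons a t => exact fun h => hndk (h ▸ List.mem_cons_self)
        have hnxt_ne_p : ks.headD "tail" ≠ prevK := by
          cases ks with
          | nil => exact Ne.symm hpt
          | cons a t => exact fun h => hpv' (h ▸ List.mem_cons_self)
        rw [show dllbLoop low high (f + 1) d k =
            dllbLoop low high f
              (pvDel (pvSetField (pvSetField d prevK "next" (ks.headD "tail"))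
                (ks.headD "tail") "prev" prevK) k) (ks.headD "tail")
          from by simp only [dllbLoop, if_neg hktail, hval, if_pos hkeep, hfld1, hfld2]]
        -- invariants for the recursive call
        have hN3 : ∃ w', lookA (pvDel (pvSetField (pvSetField d prevK "next" (ks.headD "tail"))
            (ks.headD "tail") "prev" prevK) k) prevK = some w' ∧
            lookA w' "next" = some (ks.headD "tail") := by
          refine ⟨pvSet (pvGetD d prevK []) "next" (ks.headD "tail"), ?_, lookA_pvSet_self _ _ _⟩
          rw [lookA_pvDel_ne _ _ _ (Ne.symm hkprev),
              lookA_pvSetField_ne _ _ _ _ _ (Ne.symm hnxt_ne_p),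
              lookA_pvSetField_self]
        have hW3 : WInv (pvDel (pvSetField (pvSetField d prevK "next" (ks.headD "tail"))
            (ks.headD "tail") "prev" prevK) k) prevK ks := by
          cases ks with
          | nil =>
            obtain ⟨t, ht, htp⟩ := hWrec
            refine ⟨pvSet (pvGetD (pvSetField d prevK "next" "tail") "tail" []) "prev" prevK,
              ?_, lookA_pvSet_self _ _ _⟩
            simp only [List.headD_nil]
            rw [lookA_pvDel_ne _ _ _ (Ne.symm hktail), lookA_pvSetField_self]
          | cons k' ks2 =>
            obtain ⟨⟨v', hv'k, hv'p, hv'n⟩, hpar', hWrec2⟩ := hWrec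
            have hk'k : k' ≠ k := fun h => hndk (h ▸ List.mem_cons_self)
            have hk'p : k' ≠ prevK := fun h => hpv' (h ▸ List.mem_cons_self)
            have hk't : k' ≠ "tail" := fun h => htl' (h ▸ List.mem_cons_self)
            have hk'2 : k' ∉ ks2 := (List.nodup_cons.mp hnd').1
            simp only [List.headD_cons]
            refine ⟨⟨pvSet (pvGetD (pvSetField d prevK "next" k') k' []) "prev" prevK,
              ?_, lookA_pvSet_self _ _ _, ?_⟩, hpar', ?_⟩
            · rw [lookA_pvDel_ne _ _ _ hk'k, lookA_pvSetField_self]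
            · rw [lookA_pvSet_ne _ _ _ _ (by decide)]
              unfold pvSetField
              rw [pvGetD_pvSet_ne _ _ _ _ _ hk'p, pvGetD_eq_lookA _ _ _ _ hv'k]
              exact hv'n
            · refine WInv_ext ks2 k' _ d (fun x hx => ?_) hWrec2
              have hxk : x ≠ k := by
                rcases hx with hx | hx
                · exact fun h => hndk (h ▸ List.mem_cons_of_mem _ hx)
                · exact hx ▸ Ne.symm hktail
              have hxk' : x ≠ k' := by
                rcases hx with hx | hx
                · exact fun h => hk'2 (h ▸ hx)
                · exact hx ▸ Ne.symm hk't
              have hxp : x ≠ prevK := by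
                rcases hx with hx | hx
                · exact fun h => hpv' (h ▸ List.mem_cons_of_mem _ hx)
                · exact hx ▸ Ne.symm hpt
              rw [lookA_pvDel_ne _ _ _ hxk, lookA_pvSetField_ne _ _ _ _ _ hxk',
                  lookA_pvSetField_ne _ _ _ _ _ hxp]
        rw [ih f _ prevK (by simp only [List.length_cons] at hfuel; omega) hN3 hW3
          hnd' htl' hpv' hpt]
        -- now massage the deletion folds
        rw [pvDel_pvSetField_ne _ _ _ _ _ (Ne.symm hnxt_ne_k),
            pvDel_pvSetField_ne _ _ _ _ _ hkprev]
        simp only [List.filter_cons, hkf, Bool.not_false, Bool.false_eq_true, if_false, if_true,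
          List.foldl_cons]
        cases ks with
        | nil =>
          obtain ⟨t, ht, htp⟩ := hWrec
          simp only [List.headD_nil, List.filter_nil, List.foldl_nil, List.nil_append]
          rw [relink_absorb_prev _ _ _ _ _ (Ne.symm hpt)
            (by rw [lookA_pvSetField_ne _ _ _ _ _ (Ne.symm hpt),
                    lookA_pvDel_ne _ _ _ (Ne.symm hktail), ht]; rfl)]
          rw [relink_absorb_next]
        | cons k' ks2 =>
          obtain ⟨⟨v', hv'k, hv'p, hv'n⟩, hpar', hWrec2⟩ := hWrec
          have hk'k : k' ≠ k := fun h => hndk (h ▸ List.mem_cons_self)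
          have hk'p : k' ≠ prevK := fun h => hpv' (h ▸ List.mem_cons_self)
          have hk'2 : k' ∉ ks2 := (List.nodup_cons.mp hnd').1
          have hrem2sub : ∀ x, x ∈ ks2.filter (fun k => !(pvKeep low high k)) → x ∈ ks2 :=
            fun x hx => (List.mem_filter.mp hx).1
          have hk'rem2 : k' ∉ ks2.filter (fun k => !(pvKeep low high k)) :=
            fun hx => hk'2 (hrem2sub _ hx)
          have hprem2 : prevK ∉ ks2.filter (fun k => !(pvKeep low high k)) :=
            fun hx => hpv' (List.mem_cons_of_mem _ (hrem2sub _ hx))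
          simp only [List.headD_cons, List.filter_cons]
          by_cases hk'keep : pvKeep low high k' = true
          · -- the next node survives: both stale writes are absorbed by the first relink pair
            simp only [hk'keep, Bool.not_true, Bool.false_eq_true, if_false, if_true,
              List.cons_append]
            rw [delAll_pvSetField_not_mem _ _ _ _ _ hk'rem2,
                delAll_pvSetField_not_mem _ _ _ _ _ hprem2]
            rw [relink_absorb_prev _ _ _ _ _ hk'p
              (by rw [lookA_pvSetField_ne _ _ _ _ _ hk'p,
                      lookA_delAll _ _ _ hk'rem2, lookA_pvDel_ne _ _ _ hk'k, hv'k]; rfl)]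
            rw [relink_absorb_next]
          · -- the next node is removed as well: its stale write is deleted with it
            simp only [Bool.not_eq_true] at hk'keep
            simp only [hk'keep, Bool.not_false, Bool.false_eq_true, if_false, if_true]
            rw [delAll_pvSetField_mem _ _ _ _ _ (List.mem_cons_self),
                delAll_pvSetField_not_mem _ _ _ _ _
                  (by simp only [List.mem_cons, not_or]
                      exact ⟨Ne.symm hk'p, hprem2⟩)]
            cases hsurv : ks2.filter (pvKeep low high) ++ ["tail"] with
            | nil => exact absurd hsurv (by simp)
            | cons c0 c' => rw [relink_absorb_next]
      · -- ---- keep branch ----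
        have hkt : pvKeep low high k = true := by
          simp only [pvKeep, hval]
          simp only [Bool.and_eq_true, decide_eq_true_eq]
          omega
        rw [show dllbLoop low high (f + 1) d k = dllbLoop low high f d (ks.headD "tail")
          from by simp only [dllbLoop, if_neg hktail, hval, if_neg hkeep, hfld2]]
        rw [ih f d k (by simp only [List.length_cons] at hfuel; omega)
          ⟨v, hvk, hvnext⟩ hWrec hnd' htl' hndk hktail]
        simp only [List.filter_cons, hkt, Bool.not_true, Bool.false_eq_true, if_false, if_true,
          List.cons_append]
        have hDp : lookA ((ks.filter (fun k => !(pvKeep low high k))).foldl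
            (fun d k => pvDel d k) d) prevK = some w := by
          rw [lookA_delAll _ _ _ hprem]; exact hw
        have hDk : lookA ((ks.filter (fun k => !(pvKeep low high k))).foldl
            (fun d k => pvDel d k) d) k = some v := by
          rw [lookA_delAll _ _ _ hkrem]; exact hvk
        have hrhs : relinkPairs ((ks.filter (fun k => !(pvKeep low high k))).foldl
              (fun d k => pvDel d k) d)
              (prevK :: k :: (ks.filter (pvKeep low high) ++ ["tail"])) =
            relinkPairs ((ks.filter (fun k => !(pvKeep low high k))).foldl
              (fun d k => pvDel d k) d)
              (k :: (ks.filter (pvKeep low high) ++ ["tail"])) := by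
          have h1 : relinkPairs ((ks.filter (fun k => !(pvKeep low high k))).foldl
                (fun d k => pvDel d k) d)
                (prevK :: k :: (ks.filter (pvKeep low high) ++ ["tail"])) =
              relinkPairs (pvSetField (pvSetField ((ks.filter (fun k => !(pvKeep low high k))).foldl
                (fun d k => pvDel d k) d) prevK "next" k) k "prev" prevK)
                (k :: (ks.filter (pvKeep low high) ++ ["tail"])) := rfl
          rw [h1, pvSetField_id _ prevK "next" k w hDp (by simpa using hwn),
              pvSetField_id _ k "prev" prevK v hDk hvprev]
        rw [hrhs]

-- walk extraction: a successful preWalk yields the chain and all its properties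
theorem preWalk_spec (d : List (String × List (String × String))) :
    ∀ (fuel : Nat) (vis : List String) (prevK cur : String),
      preWalk d vis fuel prevK cur = true →
      ∃ rest : List String,
        cur = rest.headD "tail" ∧ WInv d prevK rest ∧ rest.Nodup ∧ "tail" ∉ rest ∧
        (∀ x ∈ rest, x ∉ vis) ∧ pvWalk d fuel cur = rest ∧ rest.length < fuel := by
  intro fuel
  induction fuel with
  | zero => intro vis p c h; simp [preWalk] at h
  | succ f ih =>
    intro vis p c h
    by_cases hc : c = "tail"
    · subst hc
      simp only [preWalk, if_pos rfl] at h
      refine ⟨[], rfl, ?_, by simp, by simp, by simp, by simp [pvWalk], by simp⟩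
      cases ht : lookA d "tail" with
      | none => rw [ht] at h; simp at h
      | some t =>
        rw [ht] at h
        exact ⟨t, ht, by simpa using h⟩
    · simp only [preWalk, if_neg hc, Bool.and_eq_true, Bool.not_eq_true'] at h
      obtain ⟨hnv, h2⟩ := h
      cases hvc : lookA d c with
      | none => rw [hvc] at h2; simp at h2
      | some v =>
        rw [hvc] at h2
        simp only [Bool.and_eq_true, beq_iff_eq] at h2
        obtain ⟨⟨hpar, hprev⟩, h3⟩ := h2
        cases hnx : lookA v "next" with
        | none =>
          rw [hnx] at h3
          simp at h3
        | some nxt =>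
          rw [hnx] at h3
          obtain ⟨rest, hhd, hW, hnd, htl, hvis, hwalk, hlen⟩ := ih (c :: vis) c nxt h3
          have hcvis : c ∉ vis := by simpa using hnv
          refine ⟨c :: rest, by simp, ?_, ?_, ?_, ?_, ?_, by simp; omega⟩
          · exact ⟨⟨v, hvc, hprev, by rw [hnx, hhd]⟩, hpar, hW⟩
          · exact List.nodup_cons.mpr
              ⟨fun hm => (hvis c hm) (List.mem_cons_self), hnd⟩
          · intro hm
            rcases List.mem_cons.mp hm with hm | hm
            · exact hc hm.symm
            · exact htl hm
          · intro x hx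
            rcases List.mem_cons.mp hx with rfl | hx'
            · exact hcvis
            · exact fun hm => (hvis x hx') (List.mem_cons_of_mem _ hm)
          · simp only [pvWalk, if_neg hc]
            have hf : pvField d c "next" = nxt := by
              unfold pvField
              rw [pvGetD_eq_lookA _ _ _ _ hvc, pvGetD_eq_lookA _ _ _ _ hnx]
            rw [hf, hwalk]

-- relinking an already-consistent chain changes nothing
theorem relink_id (d : List (String × List (String × String))) :
    ∀ (rest : List String) (prevK : String),
      (∃ w, lookA d prevK = some w ∧ lookA w "next" = some (rest.headD "tail")) →
      WInv d prevK rest →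
      relinkPairs d (prevK :: (rest ++ ["tail"])) = d := by
  intro rest
  induction rest with
  | nil =>
    intro p hN hW
    obtain ⟨w, hw, hwn⟩ := hN
    obtain ⟨t, ht, htp⟩ := hW
    simp only [List.nil_append, relinkPairs]
    rw [pvSetField_id d p "next" "tail" w hw (by simpa using hwn),
        pvSetField_id d "tail" "prev" p t ht htp]
  | cons k ks ih =>
    intro p hN hW
    obtain ⟨w, hw, hwn⟩ := hN
    obtain ⟨⟨v, hvk, hvp, hvn⟩, _, hWrec⟩ := hW
    simp only [List.cons_append]
    have h1 : relinkPairs d (p :: k :: (ks ++ ["tail"])) =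
        relinkPairs (pvSetField (pvSetField d p "next" k) k "prev" p)
          (k :: (ks ++ ["tail"])) := rfl
    rw [h1, pvSetField_id d p "next" k w hw (by simpa using hwn),
        pvSetField_id d k "prev" p v hvk hvp]
    simpa using ih k ⟨v, hvk, hvn⟩ hWrec

-- the walk facts of the no-removal case
def LInv (low high : Int) (d : List (String × List (String × String))) : List String → Prop
  | [] => True
  | k :: ks =>
      (∃ v, lookA d k = some v ∧ lookA v "next" = some (ks.headD "tail")) ∧
      pvKeep low high k = true ∧ LInv low high d ks

-- A's loop is the identity when every visited node is in range
theorem dllbLoop_nokeep (low high : Int) (d : List (String × List (String × String))) :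
    ∀ (rest : List String) (fuel : Nat), rest.length < fuel → LInv low high d rest →
      dllbLoop low high fuel d (rest.headD "tail") = d := by
  intro rest
  induction rest with
  | nil =>
    intro fuel h _
    cases fuel with
    | zero => omega
    | succ f => simp [dllbLoop]
  | cons k ks ih =>
    intro fuel hf hL
    obtain ⟨⟨v, hvk, hvn⟩, hkeep, hrec⟩ := hL
    cases fuel with
    | zero => simp at hf
    | succ f =>
      simp only [List.headD_cons]
      by_cases hkt : k = "tail"
      · simp [dllbLoop, hkt]
      · have hex : ∃ val, PySem.Int.ofStr? k = some val ∧ low ≤ val ∧ val ≤ high := by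
          unfold pvKeep at hkeep
          cases hof : PySem.Int.ofStr? k with
          | none => rw [hof] at hkeep; simp at hkeep
          | some val =>
            rw [hof] at hkeep
            simp only [Bool.and_eq_true, decide_eq_true_eq] at hkeep
            exact ⟨val, rfl, hkeep.1, hkeep.2⟩
        obtain ⟨val, hval, h1, h2⟩ := hex
        have hfld : pvField d k "next" = ks.headD "tail" := by
          unfold pvField
          rw [pvGetD_eq_lookA _ _ _ _ hvk, pvGetD_eq_lookA _ _ _ _ hvn]
        rw [show dllbLoop low high (f + 1) d k = dllbLoop low high f d (ks.headD "tail") from by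
          simp only [dllbLoop, if_neg hkt, hval,
            if_neg (by omega : ¬(val < low ∨ val > high)), hfld]]
        exact ih f (by simp only [List.length_cons] at hf; omega) hrec

-- extraction for the weak walk
theorem preWalkLite_spec (low high : Int) (d : List (String × List (String × String))) :
    ∀ (fuel : Nat) (cur : String), preWalkLite low high d fuel cur = true →
      ∃ rest : List String,
        cur = rest.headD "tail" ∧ LInv low high d rest ∧
        (∀ x ∈ rest, pvKeep low high x = true) ∧ pvWalk d fuel cur = rest ∧
        rest.length < fuel := by
  intro fuel
  induction fuel with
  | zero => intro c h; simp [preWalkLite] at h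
  | succ f ih =>
    intro c h
    by_cases hc : c = "tail"
    · subst hc
      exact ⟨[], rfl, trivial, by simp, by simp [pvWalk], by simp⟩
    · simp only [preWalkLite, if_neg hc] at h
      cases hvc : lookA d c with
      | none => rw [hvc] at h; simp at h
      | some v =>
        rw [hvc] at h
        simp only [Bool.and_eq_true] at h
        obtain ⟨hkeep, h2⟩ := h
        cases hnx : lookA v "next" with
        | none => rw [hnx] at h2; simp at h2
        | some nxt =>
          rw [hnx] at h2
          obtain ⟨rest, hhd, hL, hall, hwalk, hlen⟩ := ih nxt h2
          refine ⟨c :: rest, by simp, ⟨⟨v, hvc, by rw [hnx, hhd]⟩, hkeep, hL⟩, ?_, ?_,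
            by simp; omega⟩
          · intro x hx
            rcases List.mem_cons.mp hx with rfl | hx
            · exact hkeep
            · exact hall x hx
          · simp only [pvWalk, if_neg hc]
            have hf : pvField d c "next" = nxt := by
              unfold pvField
              rw [pvGetD_eq_lookA _ _ _ _ hvc, pvGetD_eq_lookA _ _ _ _ hnx]
            rw [hf, hwalk]

-- ===== VERDICT (by name: the statement is the Claim_ definition above) =====
theorem dllb_spec : Claim_equal_dllb := by
  unfold Claim_equal_dllb
  intro listx low high _ hpre
  obtain ⟨hshape, hnd⟩ := hpre
  unfold Spec_dllb
  cases hh : lookA listx "head" with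
  | none => rw [hh] at hshape; simp at hshape
  | some h =>
    have hshape2 : (match lookA h "next" with
        | some n0 =>
          preWalk listx ["head"] listx.length "head" n0 ||
            preWalkLite low high listx listx.length n0
        | none => false) = true := by
      rw [hh] at hshape; exact hshape
    cases hn : lookA h "next" with
    | none => rw [hn] at hshape2; simp at hshape2
    | some n0 =>
      have hpw : (preWalk listx ["head"] listx.length "head" n0 ||
          preWalkLite low high listx listx.length n0) = true := by
        rw [hn] at hshape2; exact hshape2
      have hfld : pvField listx "head" "next" = n0 := by
        unfold pvField
        rw [pvGetD_eq_lookA _ _ _ _ hh, pvGetD_eq_lookA _ _ _ _ hn]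
      rw [Bool.or_eq_true] at hpw
      rcases hpw with hpw | hpw
      · -- the full walk holds: A's loop is the delete-then-relink pipeline
        obtain ⟨rest, hhd, hW, hnd', htl, hvis, hwalk, hlen⟩ :=
          preWalk_spec listx listx.length ["head"] "head" n0 hpw
        have hheadnr : "head" ∉ rest := fun hm => (hvis _ hm) (by simp)
        have hN : ∃ w, lookA listx "head" = some w ∧
            lookA w "next" = some (rest.headD "tail") := ⟨h, hh, by rw [hn, hhd]⟩
        simp only [dllb, dllb_alt, hfld, hwalk]
        by_cases hrem : rest.filter (fun k => !(pvKeep low high k)) = []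
        · -- nothing is removed: A's loop relinks an already-consistent chain
          simp only [hrem, List.isEmpty_nil, if_true]
          rw [hhd, dllbLoop_pipeline low high rest listx.length listx "head" hlen hN hW
            hnd' htl hheadnr (by decide), hrem]
          simp only [List.foldl_nil]
          have hfk : rest.filter (pvKeep low high) = rest := by
            apply List.filter_eq_self.mpr
            intro x hx
            have := List.filter_eq_nil_iff.mp hrem x hx
            simpa using this
          rw [hfk]
          exact relink_id listx rest "head" hN hW
        · simp only [if_neg (show ¬((rest.filter (fun k => !(pvKeep low high k))).isEmpty = true)
            from fun hx => hrem (List.isEmpty_iff.mp hx))]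
          rw [hhd]
          exact dllbLoop_pipeline low high rest listx.length listx "head" hlen hN hW
            hnd' htl hheadnr (by decide)
      · -- the weak walk holds: everything is in range and both sides return listx unchanged
        obtain ⟨rest, hhd, hL, hall, hwalk, hlen⟩ :=
          preWalkLite_spec low high listx listx.length n0 hpw
        simp only [dllb, dllb_alt, hfld, hwalk]
        have hrem : rest.filter (fun k => !(pvKeep low high k)) = [] :=
          List.filter_eq_nil_iff.mpr (fun x hx => by simp [hall x hx])
        simp only [hrem, List.isEmpty_nil, if_true]
        rw [hhd]
        exact dllbLoop_nokeep low high listx rest listx.length hlen hL
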